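-- pv_equiv track=rewrite | github.com/rie-amasato/MakingMage | MakingMage/MakingMage.py | Reset
-- ===== SOURCE A (Python) =====
-- def Reset(N):
--     map=[]
--     for i in range(N):
--         map.append([0 for i in range(N)])
--     for y in range(N):
--         for x in range(N):
--             if x==0 or y==0 or x==N-1 or y==N-1:
--                 map[x][y]=1
--     return map
-- ===== SOURCE B (Python) =====
-- def Reset(N):
--     rows = []
--     for i in range(N):
--         if i == 0 or i == N - 1:
--             rows.append([1] * N)
--         else:
--             rows.append([1] + [0] * (N - 2) + [1])
--     return rows
-- ===== Notes on version B (the rewrite author's own statement) =====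
-- stated objective: simpler
-- what changed: B builds the grid row by row in one pass, emitting a full ones row for the first and last row index and otherwise a row with ones only at its two ends, instead of allocating an N-by-N zero grid and then overwriting the border cells in a second nested per-cell pass.
import Mathlib
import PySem

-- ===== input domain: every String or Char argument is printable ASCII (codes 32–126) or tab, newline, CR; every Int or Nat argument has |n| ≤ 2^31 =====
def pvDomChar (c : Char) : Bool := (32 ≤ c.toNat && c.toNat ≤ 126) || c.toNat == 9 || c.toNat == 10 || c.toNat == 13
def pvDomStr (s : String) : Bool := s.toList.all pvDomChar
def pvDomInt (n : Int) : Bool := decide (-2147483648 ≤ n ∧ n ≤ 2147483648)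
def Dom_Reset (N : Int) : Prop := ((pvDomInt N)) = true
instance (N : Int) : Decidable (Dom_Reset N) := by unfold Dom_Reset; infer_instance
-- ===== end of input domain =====

-- B builds the grid row by row in one pass instead of allocating an N×N zero grid and
-- overwriting the border cells in a second nested per-cell pass (objective: simpler).

-- ===== PORT A =====
-- map[x][y] = 1 ported with the total pySetD/pyGetD: x, y come from range(N), so the
-- indices are always in range and Python never raises here (exact).
def Reset (N : Int) : List (List Int) :=
  let m := (PySem.List.pyRange 0 N 1).foldl
      (fun m _i => m ++ [(PySem.List.pyRange 0 N 1).map (fun _j => (0 : Int))]) []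
  (PySem.List.pyRange 0 N 1).foldl (fun m y =>
    (PySem.List.pyRange 0 N 1).foldl (fun m x =>
      if x == 0 || y == 0 || x == N - 1 || y == N - 1 then
        PySem.List.pySetD m x (PySem.List.pySetD (PySem.List.pyGetD m x []) y 1)
      else m) m) m

-- ===== PORT B =====
def Reset_alt (N : Int) : List (List Int) :=
  (PySem.List.pyRange 0 N 1).foldl (fun rows i =>
    rows ++ [if i == 0 || i == N - 1 then List.replicate N.toNat (1 : Int)
             else [1] ++ List.replicate (N - 2).toNat (0 : Int) ++ [1]]) []

-- ===== PRECONDITION & SPEC =====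
def Spec_Reset (N : Int) (out : List (List Int)) : Prop := out = Reset_alt N
instance (N : Int) (out : List (List Int)) : Decidable (Spec_Reset N out) := by unfold Spec_Reset; infer_instance

-- ===== CLAIM (what is proved, stated in full; the proofs are below) =====
def Claim_equal_Reset : Prop := ∀ (N : Int), Dom_Reset N → Spec_Reset N (Reset N)

-- ===== LEMMAS AND PROOFS =====

-- the border predicate of A, with row index x and column index y as Nats
def pvBorder (N : Int) (x y : Nat) : Bool :=
  ((x : Int) == 0 || (y : Int) == 0 || (x : Int) == N - 1 || (y : Int) == N - 1)

-- one inner pass (fixed column y): the step as a fold over Nat row indices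
def pvInner (N : Int) (y : Nat) (m : List (List Int)) : List (List Int) :=
  (List.range N.toNat).foldl
    (fun m x => if pvBorder N x y then m.set x ((m.getD x []).set y 1) else m) m

lemma pvInner_length (N : Int) (y : Nat) (m : List (List Int)) :
    (pvInner N y m).length = m.length := by
  unfold pvInner
  induction List.range N.toNat generalizing m with
  | nil => rfl
  | cons x xs ih =>
    simp only [List.foldl_cons]
    split <;> rw [ih] <;> simp

lemma pvInner_getD (N : Int) (y : Nat) (m : List (List Int)) (j : Nat) (hm : m.length = N.toNat) :
    (pvInner N y m).getD j [] =
      if j < N.toNat ∧ pvBorder N j y then (m.getD j []).set y 1 else m.getD j [] := by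
  unfold pvInner
  have key : ∀ (xs : List Nat), xs.Nodup → (∀ x ∈ xs, x < m.length) →
      ∀ (m' : List (List Int)), m'.length = m.length →
      (xs.foldl (fun m x => if pvBorder N x y then m.set x ((m.getD x []).set y 1) else m) m').getD j []
        = if j ∈ xs ∧ pvBorder N j y then (m'.getD j []).set y 1 else m'.getD j [] := by
    intro xs
    induction xs with
    | nil => intro _ _ m' _; simp
    | cons x xs ih =>
      intro hnd hlt m' hlen
      simp only [List.foldl_cons]
      by_cases hb : pvBorder N x y
      · rw [if_pos hb]
        rw [ih hnd.of_cons (fun z hz => hlt z (List.mem_cons_of_mem _ hz)) _ (by simp [hlen])]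
        by_cases hjx : j = x
        · subst hjx
          have hjm : j < m'.length := hlen ▸ hlt j (List.mem_cons_self ..)
          have hnotmem : j ∉ xs := by
            have := hnd; simp [List.nodup_cons] at this; exact this.1
          simp only [hnotmem, false_and, if_false]
          have hget : (m'.set j ((m'.getD j []).set y 1)).getD j [] = (m'.getD j []).set y 1 := by
            simp [List.getD, List.getElem?_set, hjm]
          rw [hget]
          simp [hb, List.set_set]
        · have hget : (m'.set x ((m'.getD x []).set y 1)).getD j [] = m'.getD j [] := by
            simp [List.getD, List.getElem?_set, Ne.symm hjx]
          rw [hget]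
          simp [hjx]
      · rw [if_neg hb]
        rw [ih hnd.of_cons (fun z hz => hlt z (List.mem_cons_of_mem _ hz)) _ hlen]
        simp only [List.mem_cons]
        by_cases hjx : j = x
        · subst hjx; simp [hb]
        · simp [hjx]
  rw [key (List.range N.toNat) (List.nodup_range) (fun x hx => by rw [hm]; exact List.mem_range.mp hx) m rfl]
  simp [List.mem_range]

-- pvInner preserves the row lengths
lemma pvInner_rowlen (N : Int) (y : Nat) (m : List (List Int))
    (hm : m.length = N.toNat) (hrow : ∀ r ∈ m, r.length = N.toNat) :
    ∀ r ∈ pvInner N y m, r.length = N.toNat := by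
  intro r hr
  obtain ⟨j, hj, hje⟩ := List.mem_iff_getElem.mp hr
  have hjm : j < m.length := by rw [← pvInner_length N y m]; exact hj
  have hget : (pvInner N y m).getD j [] = r := by
    rw [List.getD_eq_getElem _ _ hj, hje]
  rw [pvInner_getD N y m j hm] at hget
  have hmem : m.getD j [] ∈ m := by
    rw [List.getD_eq_getElem _ _ hjm]; exact List.getElem_mem hjm
  have hlen : (m.getD j []).length = N.toNat := hrow _ hmem
  have hlen' : (m[j]?.getD []).length = N.toNat := hlen
  split at hget <;> rw [← hget] <;> simp [hlen']

-- after the outer loop over columns ys, entry (j, k)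
lemma pvOuter_entry (N : Int) (ys : List Nat) (m : List (List Int)) (j k : Nat)
    (hnd : ys.Nodup) (hys : ∀ z ∈ ys, z < N.toNat)
    (hm : m.length = N.toNat) (hrow : ∀ r ∈ m, r.length = N.toNat)
    (hj : j < N.toNat) (hk : k < N.toNat) :
    ((ys.foldl (fun m y => pvInner N y m) m).getD j []).getD k 0 =
      if k ∈ ys ∧ pvBorder N j k then 1 else (m.getD j []).getD k 0 := by
  induction ys generalizing m with
  | nil => simp
  | cons y ys ih =>
    simp only [List.foldl_cons]
    have hm' : (pvInner N y m).length = N.toNat := by rw [pvInner_length]; exact hm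
    have hrow' := pvInner_rowlen N y m hm hrow
    rw [ih (pvInner N y m) hnd.of_cons (fun z hz => hys z (List.mem_cons_of_mem _ hz)) hm' hrow']
    have hrowj : (m.getD j []).length = N.toNat := by
      apply hrow
      rw [List.getD_eq_getElem _ _ (hm ▸ hj)]
      exact List.getElem_mem _
    have hrv : (pvInner N y m).getD j [] =
        if j < N.toNat ∧ pvBorder N j y then (m.getD j []).set y 1 else m.getD j [] :=
      pvInner_getD N y m j hm
    have hynotin : y ∉ ys := by
      have := hnd; simp [List.nodup_cons] at this; exact this.1
    by_cases hky : k = y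
    · subst hky
      have hkr : k < (m.getD j []).length := hrowj ▸ hk
      simp only [hynotin, false_and, if_false, hrv, hj, true_and]
      by_cases hb : pvBorder N j k
      · rw [if_pos hb]
        have hkr' : k < (m[j]?.getD []).length := hkr
        have : ((m.getD j []).set k 1).getD k 0 = 1 := by
          simp [List.getD, List.getElem?_set, hkr']
        rw [this]
        simp [hb]
      · rw [if_neg hb]
        simp [hb]
    · have hset : ∀ (v : Int), ((m.getD j []).set y v).getD k 0 = (m.getD j []).getD k 0 := by
        intro v; simp [List.getD, List.getElem?_set, Ne.symm hky]
      have hrvk : ((pvInner N y m).getD j []).getD k 0 = (m.getD j []).getD k 0 := by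
        rw [hrv]; split
        · exact hset 1
        · rfl
      rw [hrvk]
      simp [List.mem_cons, hky]

-- length of the outer fold
lemma pvOuter_length (N : Int) (ys : List Nat) (m : List (List Int)) :
    (ys.foldl (fun m y => pvInner N y m) m).length = m.length := by
  induction ys generalizing m with
  | nil => rfl
  | cons y ys ih => simp only [List.foldl_cons]; rw [ih, pvInner_length]

lemma pvOuter_rowlen (N : Int) (ys : List Nat) (m : List (List Int))
    (hm : m.length = N.toNat) (hrow : ∀ r ∈ m, r.length = N.toNat) :
    ∀ r ∈ ys.foldl (fun m y => pvInner N y m) m, r.length = N.toNat := by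
  induction ys generalizing m with
  | nil => exact hrow
  | cons y ys ih =>
    simp only [List.foldl_cons]
    exact ih _ (by rw [pvInner_length]; exact hm) (pvInner_rowlen N y m hm hrow)

-- the common canonical grid
def pvGrid (N : Int) : List (List Int) :=
  (List.range N.toNat).map (fun j =>
    (List.range N.toNat).map (fun k => if pvBorder N j k then 1 else 0))

lemma pvReset_eq (N : Int) :
    Reset N = (List.range N.toNat).foldl (fun m y => pvInner N y m)
      (List.replicate N.toNat (List.replicate N.toNat (0 : Int))) := by
  unfold Reset pvInner pvBorder
  simp only [PySem.List.pyRange_zero, List.foldl_map,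
    PySem.List.foldl_append_singleton_eq_map, List.nil_append,
    PySem.List.pySetD_natCast, PySem.List.pyGetD_natCast, List.map_map]
  congr 1
  simp [Function.comp_def, List.map_const']

lemma pvReset_eq_grid (N : Int) : Reset N = pvGrid N := by
  rw [pvReset_eq]
  apply List.ext_getElem
  · rw [pvOuter_length]
    simp [pvGrid]
  · intro j hj hj'
    have hjn : j < N.toNat := by
      have := hj; rwa [pvOuter_length, List.length_replicate] at this
    have hrow0 : ∀ r ∈ List.replicate N.toNat (List.replicate N.toNat (0 : Int)),
        r.length = N.toNat := by
      intro r hr; rw [List.eq_of_mem_replicate hr]; simp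
    apply List.ext_getElem
    · have := pvOuter_rowlen N (List.range N.toNat)
        (List.replicate N.toNat (List.replicate N.toNat (0 : Int))) (by simp) hrow0
      rw [this _ (List.getElem_mem hj)]
      simp [pvGrid, hjn]
    · intro k hk hk'
      have hkn : k < N.toNat := by
        have hl := pvOuter_rowlen N (List.range N.toNat)
          (List.replicate N.toNat (List.replicate N.toNat (0 : Int))) (by simp) hrow0
          _ (List.getElem_mem hj)
        rwa [hl] at hk
      have hmain := pvOuter_entry N (List.range N.toNat)
        (List.replicate N.toNat (List.replicate N.toNat (0 : Int))) j k
        List.nodup_range (fun z hz => List.mem_range.mp hz) (by simp) hrow0 hjn hkn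
      have hlen := pvOuter_length N (List.range N.toNat)
        (List.replicate N.toNat (List.replicate N.toNat (0 : Int)))
      have hgd : ((List.foldl (fun m y => pvInner N y m)
            (List.replicate N.toNat (List.replicate N.toNat (0 : Int)))
            (List.range N.toNat)).getD j []) =
          (List.foldl (fun m y => pvInner N y m)
            (List.replicate N.toNat (List.replicate N.toNat (0 : Int)))
            (List.range N.toNat))[j] := List.getD_eq_getElem _ _ hj
      have hgd2 := List.getD_eq_getElem ((List.foldl (fun m y => pvInner N y m)
            (List.replicate N.toNat (List.replicate N.toNat (0 : Int)))
            (List.range N.toNat))[j]) (0 : Int) hk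
      rw [hgd] at hmain
      rw [hgd2] at hmain
      rw [hmain]
      simp [pvGrid, hjn, hkn, List.mem_range]

lemma pvResetAlt_eq_grid (N : Int) : Reset_alt N = pvGrid N := by
  unfold Reset_alt pvGrid
  simp only [PySem.List.pyRange_zero, List.foldl_map,
    PySem.List.foldl_append_singleton_eq_map, List.nil_append, List.map_map]
  apply List.ext_getElem
  · simp
  · intro j hj hj'
    have hjn : j < N.toNat := by simpa using hj
    have hN1 : 1 ≤ N := by omega
    simp only [List.getElem_map, List.getElem_range, Function.comp_apply]
    by_cases hb : ((j : Int) == 0 || (j : Int) == N - 1)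
    · rw [if_pos hb]
      have hbj : ∀ k, k < N.toNat → pvBorder N j k = true := by
        intro k hk
        simp only [pvBorder, Bool.or_eq_true, beq_iff_eq] at hb ⊢
        tauto
      apply List.ext_getElem
      · simp
      · intro k hk hk'
        have hkn : k < N.toNat := by simpa using hk'
        simp [hbj k hkn]
    · rw [if_neg hb]
      simp only [pvBorder, Bool.or_eq_true, beq_iff_eq] at hb
      push_neg at hb
      have hj0 : (j : Int) ≠ 0 := hb.1
      have hjN : (j : Int) ≠ N - 1 := hb.2
      have hj1 : 1 ≤ j := by omega
      have hjle : (j : Int) < N := by omega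
      have hjn2 : j ≤ N.toNat - 2 := by omega
      have hn3 : 3 ≤ N.toNat := by omega
      have h2 : (N - 2).toNat = N.toNat - 2 := by omega
      apply List.ext_getElem
      · simp [h2]; omega
      · intro k hk hk'
        have hkn : k < N.toNat := by simpa using hk'
        simp only [List.getElem_map, List.getElem_range]
        rcases Nat.lt_or_ge k 1 with hk0 | hk1
        · interval_cases k
          have : pvBorder N j 0 = true := by simp [pvBorder]
          simp [this]
        · rcases Nat.lt_or_ge k (N.toNat - 1) with hkm | hke
          · have hbk : pvBorder N j k = false := by
              simp only [pvBorder, Bool.or_eq_false_iff, beq_eq_false_iff_ne, ne_eq]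
              refine ⟨⟨⟨hj0, ?_⟩, hjN⟩, ?_⟩ <;> omega
            have hkidx : k - 1 < (List.replicate (N - 2).toNat (0 : Int)).length := by
              simp [h2]; omega
            have : ([1] ++ (List.replicate (N - 2).toNat (0 : Int) ++ [1]))[k] = (0 : Int) := by
              rw [List.getElem_append_right (by simp; omega)]
              rw [List.getElem_append_left (by simpa using hkidx)]
              simp
            simp only [List.cons_append, List.nil_append] at this ⊢
            rw [this, hbk]
            simp
          · have hke' : k = N.toNat - 1 := by omega
            have hbk : pvBorder N j k = true := by
              simp only [pvBorder, Bool.or_eq_true, beq_iff_eq]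
              exact Or.inr (by omega)
            have : ([1] ++ (List.replicate (N - 2).toNat (0 : Int) ++ [1]))[k] = (1 : Int) := by
              rw [List.getElem_append_right (by simp; omega)]
              rw [List.getElem_append_right (by simp [h2]; omega)]
              simp
            simp only [List.cons_append, List.nil_append] at this ⊢
            rw [this, hbk]
            simp

-- ===== VERDICT (by name: the statement is the Claim_ definition above) =====
theorem Reset_spec : Claim_equal_Reset := by
  intro N _
  unfold Spec_Reset
  rw [pvReset_eq_grid, pvResetAlt_eq_grid]
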